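-- pv_equiv track=rewrite | github.com/andrewb1234/ShoeMapping | personalization/rotation.py | summarize_rotation_inventory
-- ===== SOURCE A (Python) =====
-- from typing import Dict, List
--
-- def summarize_rotation_inventory(shoes: List[dict]) -> dict:
--     manual_count = sum(1 for shoe in shoes if shoe.get("source_kind") in {"manual", "manual_with_import"})
--     imported_count = sum(1 for shoe in shoes if shoe.get("source_kind") == "imported")
--     mapped_count = sum(1 for shoe in shoes if shoe.get("mapping_status") == "catalog_matched")
--     unmapped_count = sum(1 for shoe in shoes if shoe.get("mapping_status") == "unmapped")
--     return {
--         "manual_count": manual_count,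
--         "imported_count": imported_count,
--         "mapped_count": mapped_count,
--         "unmapped_count": unmapped_count,
--     }
-- ===== SOURCE B (Python) =====
-- def summarize_rotation_inventory(shoes):
--     manual_count = 0
--     imported_count = 0
--     mapped_count = 0
--     unmapped_count = 0
--     for shoe in shoes:
--         sk = shoe.get("source_kind")
--         ms = shoe.get("mapping_status")
--         if sk in {"manual", "manual_with_import"}:
--             manual_count += 1
--         if sk == "imported":
--             imported_count += 1
--         if ms == "catalog_matched":
--             mapped_count += 1
--         if ms == "unmapped":
--             unmapped_count += 1
--     return {
--         "manual_count": manual_count,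
--         "imported_count": imported_count,
--         "mapped_count": mapped_count,
--         "unmapped_count": unmapped_count,
--     }
-- ===== Notes on version B (the rewrite author's own statement) =====
-- stated objective: alternative
-- what changed: Replaced four separate generator-expression scans of the shoe list by a single loop that reads each shoe's source_kind and mapping_status once and maintains four integer accumulators.
import Mathlib
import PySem

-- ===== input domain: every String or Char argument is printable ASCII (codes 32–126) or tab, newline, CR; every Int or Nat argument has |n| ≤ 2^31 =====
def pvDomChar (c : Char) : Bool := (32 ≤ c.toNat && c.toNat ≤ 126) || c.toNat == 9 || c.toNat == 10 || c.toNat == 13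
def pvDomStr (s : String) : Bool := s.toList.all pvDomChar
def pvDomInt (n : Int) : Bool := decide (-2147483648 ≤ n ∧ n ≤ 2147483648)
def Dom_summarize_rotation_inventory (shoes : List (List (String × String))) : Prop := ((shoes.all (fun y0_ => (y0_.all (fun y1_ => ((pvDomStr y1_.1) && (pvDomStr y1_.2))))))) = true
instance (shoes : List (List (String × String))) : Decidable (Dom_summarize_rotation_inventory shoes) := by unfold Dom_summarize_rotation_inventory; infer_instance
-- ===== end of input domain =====

-- ===== PORT A =====
-- Header: B merges A's four separate counting scans over `shoes` into one loop with
-- four integer accumulators (objective: alternative decomposition; one pass instead of four scans).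
-- A: four separate 0/1-sums over the list, each scanning all shoes.
def summarize_rotation_inventory (shoes : List (List (String × String))) : List (String × Int) :=
  let manual_count : Int := shoes.foldl (fun acc shoe =>
    acc + (if (PySem.Dict.mk shoe).get? "source_kind" = some "manual" ∨
              (PySem.Dict.mk shoe).get? "source_kind" = some "manual_with_import" then 1 else 0)) 0
  let imported_count : Int := shoes.foldl (fun acc shoe =>
    acc + (if (PySem.Dict.mk shoe).get? "source_kind" = some "imported" then 1 else 0)) 0
  let mapped_count : Int := shoes.foldl (fun acc shoe =>
    acc + (if (PySem.Dict.mk shoe).get? "mapping_status" = some "catalog_matched" then 1 else 0)) 0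
  let unmapped_count : Int := shoes.foldl (fun acc shoe =>
    acc + (if (PySem.Dict.mk shoe).get? "mapping_status" = some "unmapped" then 1 else 0)) 0
  [("manual_count", manual_count), ("imported_count", imported_count),
   ("mapped_count", mapped_count), ("unmapped_count", unmapped_count)]

-- ===== PORT B =====
-- one loop body: read source_kind and mapping_status once, bump the four accumulators
def pvStepB (acc : Int × Int × Int × Int) (shoe : List (String × String)) : Int × Int × Int × Int :=
  let sk := (PySem.Dict.mk shoe).get? "source_kind"
  let ms := (PySem.Dict.mk shoe).get? "mapping_status"
  ((if sk = some "manual" ∨ sk = some "manual_with_import" then acc.1 + 1 else acc.1),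
   (if sk = some "imported" then acc.2.1 + 1 else acc.2.1),
   (if ms = some "catalog_matched" then acc.2.2.1 + 1 else acc.2.2.1),
   (if ms = some "unmapped" then acc.2.2.2 + 1 else acc.2.2.2))

def summarize_rotation_inventory_alt (shoes : List (List (String × String))) : List (String × Int) :=
  let s := shoes.foldl pvStepB (0, 0, 0, 0)
  [("manual_count", s.1), ("imported_count", s.2.1),
   ("mapped_count", s.2.2.1), ("unmapped_count", s.2.2.2)]

-- ===== PRECONDITION & SPEC =====
def Spec_summarize_rotation_inventory (shoes : List (List (String × String))) (out : List (String × Int)) : Prop := out = summarize_rotation_inventory_alt shoes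
instance (shoes : List (List (String × String))) (out : List (String × Int)) : Decidable (Spec_summarize_rotation_inventory shoes out) := by unfold Spec_summarize_rotation_inventory; infer_instance

-- ===== CLAIM =====
def Claim_equal_summarize_rotation_inventory : Prop := ∀ (shoes : List (List (String × String))), Dom_summarize_rotation_inventory shoes → Spec_summarize_rotation_inventory shoes (summarize_rotation_inventory shoes)

-- ===== LEMMAS AND PROOFS =====
-- B's single fold computes the 4-tuple of A's four folds, for every start state.
theorem pv_fold_split (shoes : List (List (String × String))) (a b c d : Int) :
    shoes.foldl pvStepB (a, b, c, d) =
      (shoes.foldl (fun acc shoe =>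
        acc + (if (PySem.Dict.mk shoe).get? "source_kind" = some "manual" ∨
                  (PySem.Dict.mk shoe).get? "source_kind" = some "manual_with_import" then 1 else 0)) a,
       shoes.foldl (fun acc shoe =>
        acc + (if (PySem.Dict.mk shoe).get? "source_kind" = some "imported" then 1 else 0)) b,
       shoes.foldl (fun acc shoe =>
        acc + (if (PySem.Dict.mk shoe).get? "mapping_status" = some "catalog_matched" then 1 else 0)) c,
       shoes.foldl (fun acc shoe =>
        acc + (if (PySem.Dict.mk shoe).get? "mapping_status" = some "unmapped" then 1 else 0)) d) := by
  induction shoes generalizing a b c d with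
  | nil => rfl
  | cons shoe rest ih =>
    simp only [List.foldl_cons, pvStepB]
    rw [ih]
    split_ifs <;> simp

-- ===== VERDICT =====
theorem summarize_rotation_inventory_spec : Claim_equal_summarize_rotation_inventory := by
  intro shoes _
  unfold Spec_summarize_rotation_inventory summarize_rotation_inventory summarize_rotation_inventory_alt
  rw [pv_fold_split]
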